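-- pv_equiv track=rewrite | github.com/augcog/ROAR_PY | roar_py_core/roar_py_interface/actors/actor.py | propose_name_and_modify_dict
-- ===== SOURCE A (Python) =====
-- def propose_name_and_modify_dict(diction: dict, new_name: str, counter: int = 0):
--     if counter < 1:
--         if new_name + "_1" in diction:
--             return propose_name_and_modify_dict(diction, new_name, 2)
--         else:
--             if new_name in diction:
--                 diction[new_name + "_1"] = diction[new_name]
--                 diction.pop(new_name)
--                 return propose_name_and_modify_dict(diction, new_name, 2)
--             else:
--                 return new_name
--     else:
--         actual_name = new_name + "_" + str(counter)
--         if actual_name in diction: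
--             return propose_name_and_modify_dict(diction, new_name, counter + 1)
--         else:
--             return actual_name
-- ===== SOURCE B (Python) =====
-- def propose_name_and_modify_dict(diction: dict, new_name: str, counter: int = 0):
--     # Bounded scan instead of unbounded recursion: among the len(diction)+1
--     # candidates new_name_start .. new_name_(start+len) at least one is free
--     # (pigeonhole), so the loop may stop after len(diction) probes and return
--     # the final candidate unchecked.  Mutates diction exactly as the original.
--     if counter < 1:
--         taken1 = new_name + "_1" in diction
--         if not taken1 and new_name not in diction:
--             return new_name
--         if not taken1:  # here new_name is in diction: do the rename
--             diction[new_name + "_1"] = diction[new_name]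
--             diction.pop(new_name)
--         start = 2
--     else:
--         start = counter
--     for i in range(start, start + len(diction)):
--         cand = new_name + "_" + str(i)
--         if cand not in diction:
--             return cand
--     # pigeonhole: all len(diction) earlier candidates were taken, so this is free
--     return new_name + "_" + str(start + len(diction))
-- ===== Notes on version B (the rewrite author's own statement) =====
-- stated objective: alternative
-- what changed: Replaces A's unbounded recursive probing with a single bounded for-loop over range(start, start+len(diction)) plus an unchecked final candidate, justified by pigeonhole (one of the len+1 candidates must be free); mutation of diction is performed identically.
import Mathlib
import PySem

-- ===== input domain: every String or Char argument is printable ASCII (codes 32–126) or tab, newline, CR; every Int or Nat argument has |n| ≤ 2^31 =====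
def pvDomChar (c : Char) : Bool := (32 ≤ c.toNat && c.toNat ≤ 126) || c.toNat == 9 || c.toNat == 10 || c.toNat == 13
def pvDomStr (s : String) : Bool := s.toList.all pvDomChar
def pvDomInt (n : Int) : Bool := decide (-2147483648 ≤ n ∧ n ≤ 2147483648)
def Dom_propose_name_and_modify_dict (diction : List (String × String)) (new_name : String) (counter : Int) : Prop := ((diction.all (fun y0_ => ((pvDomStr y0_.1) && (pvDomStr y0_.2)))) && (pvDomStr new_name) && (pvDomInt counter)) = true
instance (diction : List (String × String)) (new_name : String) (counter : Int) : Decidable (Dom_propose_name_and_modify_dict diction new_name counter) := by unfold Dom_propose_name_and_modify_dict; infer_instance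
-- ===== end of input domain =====

-- B replaces A's unbounded suffix-probing recursion by a single bounded scan over
-- range(start, start+len(diction)) (pigeonhole: one of the len+1 candidates is free);
-- equivalence is about the RETURN value, and both Pythons mutate diction identically.

-- ===== PORT A =====
-- Python A's counter>=1 recursion: probe new_name_c, new_name_(c+1), … until free.
-- The Nat fuel is only a totality guard: fuel = size+1 is provably sufficient
-- (lemma pvGoA_eq_pvScanB + pvFreeExists below), so the fuel-0 branch is never reached.
def pvGoA (d : PySem.Dict String String) (name : String) (c : Int) : Nat → String
  | 0 => name ++ "_" ++ PySem.Int.toStr c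
  | fuel + 1 =>
    let actual_name := name ++ "_" ++ PySem.Int.toStr c
    if d.contains actual_name then pvGoA d name (c + 1) fuel else actual_name

def propose_name_and_modify_dict (diction : List (String × String)) (new_name : String) (counter : Int) : String :=
  let d := PySem.Dict.mk diction
  if counter < 1 then
    if d.contains (new_name ++ "_1") then pvGoA d new_name 2 (d.size + 1)
    else if d.contains new_name then
      -- diction[new_name + "_1"] = diction[new_name]; diction.pop(new_name)
      -- (new_name is in d here, so getD's default is never used and pop = erase)
      let d' := (d.insert (new_name ++ "_1") (d.getD new_name "")).erase new_name
      pvGoA d' new_name 2 (d'.size + 1)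
    else new_name
  else pvGoA d new_name counter (d.size + 1)

-- ===== PORT B =====
-- Source B's for-loop over range(start, start+len): first free candidate, else the
-- unchecked final candidate after the loop.
def pvScanB (d : PySem.Dict String String) (name : String) : List Int → String → String
  | [], last => last
  | i :: rest, last =>
    let cand := name ++ "_" ++ PySem.Int.toStr i
    if d.contains cand then pvScanB d name rest last else cand

def propose_name_and_modify_dict_alt (diction : List (String × String)) (new_name : String) (counter : Int) : String :=
  let d := PySem.Dict.mk diction
  if counter < 1 then
    let taken1 := d.contains (new_name ++ "_1")
    if !taken1 && !d.contains new_name then new_name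
    else
      let d2 := if !taken1 then (d.insert (new_name ++ "_1") (d.getD new_name "")).erase new_name else d
      pvScanB d2 new_name (PySem.List.pyRange 2 (2 + (d2.size : Int)) 1)
        (new_name ++ "_" ++ PySem.Int.toStr (2 + (d2.size : Int)))
  else
    pvScanB d new_name (PySem.List.pyRange counter (counter + (d.size : Int)) 1)
      (new_name ++ "_" ++ PySem.Int.toStr (counter + (d.size : Int)))

-- ===== PRECONDITION & SPEC =====
def Spec_propose_name_and_modify_dict (diction : List (String × String)) (new_name : String) (counter : Int) (out : String) : Prop := out = propose_name_and_modify_dict_alt diction new_name counter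
instance (diction : List (String × String)) (new_name : String) (counter : Int) (out : String) : Decidable (Spec_propose_name_and_modify_dict diction new_name counter out) := by unfold Spec_propose_name_and_modify_dict; infer_instance

-- ===== CLAIM (what is proved, stated in full; the proofs are below) =====
def Claim_equal_propose_name_and_modify_dict : Prop := ∀ (diction : List (String × String)) (new_name : String) (counter : Int), Dom_propose_name_and_modify_dict diction new_name counter → Spec_propose_name_and_modify_dict diction new_name counter (propose_name_and_modify_dict diction new_name counter)

-- ===== LEMMAS AND PROOFS =====

-- decimal value of a digit list (left inverse of Nat.toDigits 10, used for injectivity)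
def pvVal (c : Char) : Nat := c.toNat - 48
def pvP (l : List Char) : Nat := l.foldl (fun a c => a * 10 + pvVal c) 0

theorem pvVal_digitChar (k : Nat) (h : k < 10) : pvVal (Nat.digitChar k) = k := by
  interval_cases k <;> decide

theorem pvP_append_singleton (l : List Char) (d : Char) :
    pvP (l ++ [d]) = pvP l * 10 + pvVal d := by
  simp [pvP, List.foldl_append]

theorem pvToDigitsCore_append (fuel n : Nat) (ds : List Char) :
    Nat.toDigitsCore 10 fuel n ds = Nat.toDigitsCore 10 fuel n [] ++ ds := by
  induction fuel generalizing n ds with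
  | zero => simp [Nat.toDigitsCore]
  | succ fuel ih =>
    simp only [Nat.toDigitsCore]
    by_cases h : n / 10 = 0
    · simp [h]
    · simp only [h, if_false]
      rw [ih (n / 10) _, ih (n / 10) [Nat.digitChar (n % 10)]]
      simp

theorem pvP_toDigitsCore (fuel n : Nat) (h : n < fuel) :
    pvP (Nat.toDigitsCore 10 fuel n []) = n := by
  induction fuel generalizing n with
  | zero => omega
  | succ fuel ih =>
    simp only [Nat.toDigitsCore]
    by_cases h0 : n / 10 = 0
    · have hn : n < 10 := by omega
      simp only [h0, if_true, pvP, List.foldl_cons, List.foldl_nil, Nat.zero_mul, Nat.zero_add,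
        Nat.mod_eq_of_lt hn]
      exact pvVal_digitChar n hn
    · simp only [h0, if_false]
      rw [pvToDigitsCore_append, pvP_append_singleton,
        ih (n / 10) (by omega),
        pvVal_digitChar (n % 10) (Nat.mod_lt _ (by norm_num))]
      omega

theorem pvP_toDigits (n : Nat) : pvP (Nat.toDigits 10 n) = n :=
  pvP_toDigitsCore (n + 1) n (Nat.lt_succ_self n)

theorem pvToChars_inj {i j : Int} (hi : 0 ≤ i) (hj : 0 ≤ j)
    (h : PySem.Int.toChars i = PySem.Int.toChars j) : i = j := by
  unfold PySem.Int.toChars at h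
  rw [if_neg (by omega), if_neg (by omega)] at h
  have := congrArg pvP h
  rw [pvP_toDigits, pvP_toDigits] at this
  omega

-- the probed candidate names are pairwise distinct for nonnegative indices
theorem pvCand_inj (name : String) {i j : Int} (hi : 0 ≤ i) (hj : 0 ≤ j)
    (h : name ++ "_" ++ PySem.Int.toStr i = name ++ "_" ++ PySem.Int.toStr j) : i = j := by
  have h' := congrArg String.toList h
  simp only [String.toList_append, PySem.Int.toList_toStr] at h'
  exact pvToChars_inj hi hj (List.append_cancel_left h')

-- pigeonhole: among the size+1 candidates name_c .. name_(c+size) one key is free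
theorem pvFreeExists (d : PySem.Dict String String) (name : String) (c : Int) (hc : 0 ≤ c) :
    ∃ i : Int, c ≤ i ∧ i ≤ c + d.size ∧ d.contains (name ++ "_" ++ PySem.Int.toStr i) = false := by
  by_contra hcon
  push Not at hcon
  have hall : ∀ i : Int, c ≤ i → i ≤ c + d.size →
      (name ++ "_" ++ PySem.Int.toStr i) ∈ d.keys := by
    intro i h1 h2
    have := hcon i h1 h2
    have : d.contains (name ++ "_" ++ PySem.Int.toStr i) = true := by
      cases hcc : d.contains (name ++ "_" ++ PySem.Int.toStr i) with
      | false => exact absurd hcc this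
      | true => rfl
    exact (PySem.Dict.contains_iff_mem_keys _ _).mp this
  set L := (PySem.List.pyRange c (c + (d.size : Int) + 1) 1).map
      (fun i => name ++ "_" ++ PySem.Int.toStr i) with hL
  have hmemR : ∀ i ∈ PySem.List.pyRange c (c + (d.size : Int) + 1) 1, c ≤ i ∧ i < c + d.size + 1 :=
    fun i hi => (PySem.List.mem_pyRange_one).mp hi
  have hnd : L.Nodup := by
    refine List.Nodup.map_on ?_ (PySem.List.nodup_pyRange_one c (c + (d.size : Int) + 1))
    intro x hx y hy hxy
    exact pvCand_inj name (by have := hmemR x hx; omega) (by have := hmemR y hy; omega) hxy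
  have hsub : L ⊆ d.keys := by
    intro s hs
    rw [hL, List.mem_map] at hs
    obtain ⟨i, hi, rfl⟩ := hs
    have := hmemR i hi
    exact hall i this.1 (by omega)
  have hlenL : L.length = d.size + 1 := by
    rw [hL, List.length_map, PySem.List.length_pyRange_one]
    omega
  have hkeys : d.keys.length = d.size := by
    simp [PySem.Dict.keys, PySem.Dict.size]
  have h1 : L.toFinset.card = L.length := List.toFinset_card_of_nodup hnd
  have h2 : L.toFinset ⊆ d.keys.toFinset := by
    intro x hx
    rw [List.mem_toFinset] at hx ⊢
    exact hsub hx
  have h3 : d.keys.toFinset.card ≤ d.keys.length := List.toFinset_card_le _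
  have := Finset.card_le_card h2
  omega

-- the recursive probe (with ≥ one free candidate in range) equals B's bounded scan
theorem pvGoA_eq_pvScanB (d : PySem.Dict String String) (name : String) :
    ∀ (k : Nat) (c : Int),
      (∃ i : Int, c ≤ i ∧ i ≤ c + k ∧ d.contains (name ++ "_" ++ PySem.Int.toStr i) = false) →
      pvGoA d name c (k + 1) =
        pvScanB d name (PySem.List.pyRange c (c + (k : Int)) 1)
          (name ++ "_" ++ PySem.Int.toStr (c + (k : Int))) := by
  intro k
  induction k with
  | zero =>
    intro c ⟨i, h1, h2, hfree⟩
    have : i = c := by omega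
    subst this
    rw [PySem.List.pyRange_one_eq_nil (by omega)]
    simp only [pvGoA, pvScanB, hfree]
    norm_num
  | succ k ih =>
    intro c ⟨i, h1, h2, hfree⟩
    rw [PySem.List.pyRange_one_cons (by push_cast; omega)]
    by_cases hc : d.contains (name ++ "_" ++ PySem.Int.toStr c) = true
    · rw [pvGoA, pvScanB]
      simp only [hc, if_true]
      have hik : c + 1 ≤ i := by
        rcases eq_or_lt_of_le h1 with rfl | h
        · rw [hc] at hfree; exact absurd hfree (by simp)
        · omega
      have e1 : c + (((k : Nat) + 1 : Nat) : Int) = (c + 1) + (k : Int) := by push_cast; ring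
      rw [e1]
      exact ih (c + 1) ⟨i, hik, by push_cast at h2 ⊢; omega, hfree⟩
    · have hc' : d.contains (name ++ "_" ++ PySem.Int.toStr c) = false := by
        cases h : d.contains (name ++ "_" ++ PySem.Int.toStr c) with
        | false => rfl
        | true => exact absurd h hc
      rw [pvGoA, pvScanB]
      simp [hc']

-- ===== VERDICT (by name: the statement is the Claim_ definition above) =====
theorem propose_name_and_modify_dict_spec : Claim_equal_propose_name_and_modify_dict := by
  intro diction new_name counter _
  unfold Spec_propose_name_and_modify_dict
  unfold propose_name_and_modify_dict propose_name_and_modify_dict_alt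
  set d := PySem.Dict.mk diction with hd
  by_cases hlt : counter < 1
  · simp only [hlt, if_true]
    by_cases h1 : d.contains (new_name ++ "_1") = true
    · -- "_1" taken: both scan the unmodified dict from 2
      simp only [h1, if_true, Bool.not_true, Bool.false_and, Bool.false_eq_true, if_false]
      obtain ⟨i, hi1, hi2, hfree⟩ := pvFreeExists d new_name 2 (by omega)
      rw [pvGoA_eq_pvScanB d new_name d.size 2 ⟨i, hi1, hi2, hfree⟩]
    · have h1' : d.contains (new_name ++ "_1") = false := by
        cases h : d.contains (new_name ++ "_1") with
        | false => rfl
        | true => exact absurd h h1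
      simp only [h1', Bool.not_false, Bool.true_and, if_false, Bool.false_eq_true]
      by_cases h2 : d.contains new_name = true
      · -- rename branch: both scan the renamed dict from 2
        simp only [h2, if_true, Bool.not_true, if_false, Bool.false_eq_true]
        set d' := (d.insert (new_name ++ "_1") (d.getD new_name "")).erase new_name with hd'
        obtain ⟨i, hi1, hi2, hfree⟩ := pvFreeExists d' new_name 2 (by omega)
        rw [pvGoA_eq_pvScanB d' new_name d'.size 2 ⟨i, hi1, hi2, hfree⟩]
      · have h2' : d.contains new_name = false := by
          cases h : d.contains new_name with
          | false => rfl
          | true => exact absurd h h2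
        simp [h2']
  · simp only [hlt, if_false]
    have hc : (0 : Int) ≤ counter := by omega
    obtain ⟨i, hi1, hi2, hfree⟩ := pvFreeExists d new_name counter hc
    rw [pvGoA_eq_pvScanB d new_name d.size counter ⟨i, hi1, hi2, hfree⟩]
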